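-- pv_equiv track=rewrite | github.com/Ehsanullah1999/CodeShef_Codes | PlayingWithMatches.py | countt
-- ===== SOURCE A (Python) =====
-- def countt(x):
--     count_x = 0
--     for i in x:
--         if i == '0' or i == '6' or i == '9':
--             count_x += 6
--         elif i == '1':
--             count_x += 2
--         elif i == '2' or i == '3' or i == '5':
--             count_x += 5
--         elif i == '4':
--             count_x += 4
--         elif i == '7':
--             count_x += 3
--         elif i == '8':
--             count_x += 7
--         else:
--             pass
--     return count_x;
-- ===== SOURCE B (Python) =====
-- def countt(x):
--     # phase 1: frequency table of all characters
--     freq = {}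
--     for ch in x:
--         freq[ch] = freq.get(ch, 0) + 1
--     # phase 2: weighted sum over the fixed digit->matchstick table
--     weights = {'0': 6, '1': 2, '2': 5, '3': 5, '4': 4,
--                '5': 5, '6': 6, '7': 3, '8': 7, '9': 6}
--     return sum(freq.get(d, 0) * w for d, w in weights.items())
-- ===== Notes on version B (the rewrite author's own statement) =====
-- stated objective: alternative
-- what changed: B replaces A's per-character if/elif weight chain with a two-phase count-then-weighted-sum: it first builds a character frequency table, then sums freq[d]*w over a fixed digit->matchstick weight table.
import Mathlib
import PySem

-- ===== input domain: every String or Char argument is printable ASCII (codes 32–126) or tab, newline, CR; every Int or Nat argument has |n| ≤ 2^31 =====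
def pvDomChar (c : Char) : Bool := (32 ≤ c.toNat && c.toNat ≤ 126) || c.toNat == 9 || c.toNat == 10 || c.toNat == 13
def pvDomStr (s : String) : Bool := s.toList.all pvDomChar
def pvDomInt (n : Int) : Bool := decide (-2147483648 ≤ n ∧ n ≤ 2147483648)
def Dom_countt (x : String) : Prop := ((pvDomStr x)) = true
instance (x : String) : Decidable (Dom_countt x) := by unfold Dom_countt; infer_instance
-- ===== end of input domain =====

-- B changes the decomposition: count characters first, then a weighted sum over a fixed
-- digit->matchstick table ('alternative'; same O(n) cost as A).

-- ===== PORT A =====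
def countt (x : String) : Int :=
  x.toList.foldl
    (fun count_x i =>
      if i == '0' || i == '6' || i == '9' then count_x + 6
      else if i == '1' then count_x + 2
      else if i == '2' || i == '3' || i == '5' then count_x + 5
      else if i == '4' then count_x + 4
      else if i == '7' then count_x + 3
      else if i == '8' then count_x + 7
      else count_x)
    0

-- ===== PORT B =====
def countt_weights : PySem.Dict Char Int :=
  PySem.Dict.ofList [('0', 6), ('1', 2), ('2', 5), ('3', 5), ('4', 4),
                     ('5', 5), ('6', 6), ('7', 3), ('8', 7), ('9', 6)]

def countt_alt (x : String) : Int :=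
  -- phase 1: freq = {}; for ch in x: freq[ch] = freq.get(ch, 0) + 1
  let freq := x.toList.foldl (fun d ch => d.insert ch (d.getD ch 0 + 1)) PySem.Dict.empty
  -- phase 2: sum(freq.get(d, 0) * w for d, w in weights.items())
  countt_weights.items.foldl (fun acc p => acc + freq.getD p.1 0 * p.2) 0

-- ===== PRECONDITION & SPEC =====
def Spec_countt (x : String) (out : Int) : Prop := out = countt_alt x
instance (x : String) (out : Int) : Decidable (Spec_countt x out) := by unfold Spec_countt; infer_instance

-- ===== CLAIM (what is proved, stated in full; the proofs are below) =====
def Claim_equal_countt : Prop := ∀ (x : String), Dom_countt x → Spec_countt x (countt x)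

-- ===== LEMMAS AND PROOFS =====

-- per-character weight, the value A adds for character i
def pvW (i : Char) : Int :=
  if i == '0' || i == '6' || i == '9' then 6
  else if i == '1' then 2
  else if i == '2' || i == '3' || i == '5' then 5
  else if i == '4' then 4
  else if i == '7' then 3
  else if i == '8' then 7
  else 0

theorem countt_foldl_eq (l : List Char) (a : Int) :
    l.foldl
      (fun count_x i =>
        if i == '0' || i == '6' || i == '9' then count_x + 6
        else if i == '1' then count_x + 2
        else if i == '2' || i == '3' || i == '5' then count_x + 5
        else if i == '4' then count_x + 4
        else if i == '7' then count_x + 3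
        else if i == '8' then count_x + 7
        else count_x)
      a = a + (l.map pvW).sum := by
  induction l generalizing a with
  | nil => simp
  | cons c l ih =>
    simp only [List.foldl_cons, List.map_cons, List.sum_cons, ih, pvW]
    split_ifs <;> ring

-- B as a function of the character list
theorem countt_alt_eq (x : String) :
    countt_alt x =
      countt_weights.items.foldl
        (fun acc p => acc + (x.toList.count p.1 : Int) * p.2) 0 := by
  unfold countt_alt
  rw [PySem.Dict.foldl_insert_getD_add_one_eq_counter]
  simp [PySem.Dict.getD_counter]

theorem pv_foldl_weighted (ws : List (Char × Int)) (f : Char × Int → Int) (a : Int) :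
    ws.foldl (fun acc p => acc + f p) a = a + (ws.map f).sum := by
  induction ws generalizing a with
  | nil => simp
  | cons p ws ih => simp [ih]; ring

theorem pv_indicator (c : Char) :
    ([('0', 6), ('1', 2), ('2', 5), ('3', 5), ('4', 4),
      ('5', 5), ('6', 6), ('7', 3), ('8', 7), ('9', 6)].map
        (fun p : Char × Int => if p.1 == c then p.2 else 0)).sum = pvW c := by
  by_cases h0 : c = '0'; · subst h0; decide
  by_cases h1 : c = '1'; · subst h1; decide
  by_cases h2 : c = '2'; · subst h2; decide
  by_cases h3 : c = '3'; · subst h3; decide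
  by_cases h4 : c = '4'; · subst h4; decide
  by_cases h5 : c = '5'; · subst h5; decide
  by_cases h6 : c = '6'; · subst h6; decide
  by_cases h7 : c = '7'; · subst h7; decide
  by_cases h8 : c = '8'; · subst h8; decide
  by_cases h9 : c = '9'; · subst h9; decide
  simp [pvW, beq_iff_eq, h0, h1, h2, h3, h4, h5, h6, h7, h8, h9,
        Ne.symm h0, Ne.symm h1, Ne.symm h2, Ne.symm h3, Ne.symm h4,
        Ne.symm h5, Ne.symm h6, Ne.symm h7, Ne.symm h8, Ne.symm h9]

theorem weights_sum_eq (l : List Char) :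
    countt_weights.items.foldl
      (fun acc p => acc + (l.count p.1 : Int) * p.2) 0 = (l.map pvW).sum := by
  have hitems : countt_weights.items =
      [('0', 6), ('1', 2), ('2', 5), ('3', 5), ('4', 4),
       ('5', 5), ('6', 6), ('7', 3), ('8', 7), ('9', 6)] := by decide
  rw [hitems, pv_foldl_weighted]
  induction l with
  | nil => decide
  | cons c l ih =>
    have hmap : ∀ ws : List (Char × Int),
        ws.map (fun p => ((c :: l).count p.1 : Int) * p.2)
          = ws.map (fun p => (l.count p.1 : Int) * p.2
              + (if p.1 == c then p.2 else 0)) := by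
      intro ws
      apply List.map_congr_left
      intro p _
      rw [List.count_cons]
      push_cast
      rcases eq_or_ne p.1 c with h | h
      · simp [h]; ring
      · simp [h, Ne.symm h]
    rw [hmap, List.sum_map_add, pv_indicator]
    simp only [List.map_cons, List.map_nil, List.sum_cons, List.sum_nil] at ih ⊢
    linarith [ih]

-- ===== VERDICT (by name: the statement is the Claim_ definition above) =====
theorem countt_spec : Claim_equal_countt := by
  intro x _
  unfold Spec_countt
  rw [countt_alt_eq, weights_sum_eq]
  unfold countt
  rw [countt_foldl_eq]
  ring
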